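-- pv_equiv track=rewrite | github.com/Sergio-Moy/hashing | sha.py | inicializar
-- ===== SOURCE A (Python) =====
-- def binario(msg):
--     chars = [ord(c) for c in msg] #devuelve un arreglo de los codigos unicode de cada caracter
--     bytes = []
--     for char in chars:
--         bytes.append(bin(char)[2:].zfill(8)) #convierte a bytes y agrega a aun arreglo, eliminando indicador binario
--     bits = []
--     for byte in bytes:
--         for bit in byte:
--             bits.append(int(bit)) #guarda los bytes en un arreglo de bits
--     return bits
--
-- def ceros(bits, long=8, endian="L"): #agrega ceros al mensaje para llegar a la longitud deseada
--     l = len(bits)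
--     if endian == "L": #define si se usa little endian o big endian para posicionar los ceros
--         for i in range(l, long):
--             bits.append(0)
--     else:
--         while l < long:
--             bits.insert(0, 0)
--             l = len(bits)
--     return bits
--
-- def inicializar(val):
--     binarios = [bin(int(v, 16))[2:] for v in val] # convierte a binario sin indicador
--     lista = []
--     for binario in binarios:
--         palabra = []
--         for b in binario:
--             palabra.append(int(b))
--         lista.append(ceros(palabra, 32, "BE"))
--     return lista
-- ===== SOURCE B (Python) =====
-- def inicializar(val):
--     lista = []
--     for v in val:
--         n = int(v, 16)
--         width = max(32, n.bit_length())
--         lista.append(list(reversed([(n >> i) & 1 for i in range(width)])))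
--     return lista
-- ===== Notes on version B (the rewrite author's own statement) =====
-- stated objective: alternative
-- what changed: Replaces the hex->binary-string->per-char-int->front-insert-padding pipeline with direct arithmetic bit extraction: width = max(32, n.bit_length()) and one shift-and-mask comprehension per value, no string round-trip and no padding loop.
import Mathlib
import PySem

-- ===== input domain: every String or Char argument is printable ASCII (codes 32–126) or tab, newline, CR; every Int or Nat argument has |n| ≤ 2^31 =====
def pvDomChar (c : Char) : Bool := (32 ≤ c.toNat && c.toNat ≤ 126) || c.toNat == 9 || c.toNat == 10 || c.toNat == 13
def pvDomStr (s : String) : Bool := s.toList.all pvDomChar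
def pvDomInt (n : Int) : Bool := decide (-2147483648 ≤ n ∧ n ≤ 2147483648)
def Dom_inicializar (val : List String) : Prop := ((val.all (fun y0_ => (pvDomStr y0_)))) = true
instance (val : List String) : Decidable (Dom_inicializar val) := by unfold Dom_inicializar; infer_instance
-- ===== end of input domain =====

-- B replaces A's hex→binary-string→char-loop→front-insert-padding pipeline with direct
-- shift-and-mask bit extraction over range(width), width = max(32, bit_length); same values, no speed claim.

-- ===== PORT A =====
-- ceros(bits, 32, "BE"): while len < long, insert 0 at the front
def cerosBE (bits : List Int) (long : Nat) : List Int :=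
  if bits.length < long then cerosBE (0 :: bits) long else bits
termination_by long - bits.length

def inicializar (val : List String) : List (List Int) :=
  -- binarios = [bin(int(v,16))[2:] for v in val]; int(v,16) raising (none) is excluded by
  -- Pre_, as is a negative value (whose 'b…' digits make the inner int(b) raise)
  (val.map (fun v =>
      PySem.List.slice (PySem.Int.toBinChars0b ((PySem.Int.ofStrBase? v 16).getD 0)) (some 2) none)).foldl
    (fun lista binario =>
      lista ++ [cerosBE (binario.foldl (fun p b => p ++ [(PySem.Int.ofChars? [b]).getD 0]) []) 32])
    []

-- ===== PORT B =====
def inicializar_alt (val : List String) : List (List Int) :=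
  val.map (fun v =>
    ((List.range (max 32 (PySem.Int.bitLength ((PySem.Int.ofStrBase? v 16).getD 0)))).map
      (fun i : Nat => PySem.Int.band (((PySem.Int.ofStrBase? v 16).getD 0) >>> i) 1)).reverse)

-- ===== PRECONDITION & SPEC =====
-- Pre_ excludes exactly the inputs on which A raises ValueError: strings int(v,16)
-- rejects, and negative hex values (whose bin()[2:] starts with 'b', so int('b') raises).
def Pre_inicializar (val : List String) : Prop :=
  ∀ v ∈ val, 0 ≤ (PySem.Int.ofStrBase? v 16).getD (-1)
instance (val : List String) : Decidable (Pre_inicializar val) := by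
  unfold Pre_inicializar; infer_instance
def pvWitness_inicializar : List String := ["0", " 1a ", "+FFFF_FFFF0"]

def Spec_inicializar (val : List String) (out : List (List Int)) : Prop := out = inicializar_alt val
instance (val : List String) (out : List (List Int)) : Decidable (Spec_inicializar val out) := by unfold Spec_inicializar; infer_instance

-- ===== CLAIM (what is proved, stated in full; the proofs are below) =====
def Claim_equal_inicializar : Prop := ∀ (val : List String), Dom_inicializar val → Pre_inicializar val → Spec_inicializar val (inicializar val)

-- ===== LEMMAS AND PROOFS =====

-- natBits m = the binary digits of m, MSB first (what A's inner char loop produces)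
def natBits (m : Nat) : List Int :=
  if m < 2 then [(m : Int)] else natBits (m / 2) ++ [((m % 2 : Nat) : Int)]

-- charBits m = Nat.toDigits 2 m, characterised structurally
def charBits (m : Nat) : List Char :=
  if h : m / 2 = 0 then [Nat.digitChar (m % 2)] else charBits (m / 2) ++ [Nat.digitChar (m % 2)]
decreasing_by exact Nat.div_lt_self (Nat.pos_of_ne_zero (by omega)) (by omega)

lemma toDigitsCore_eq_charBits : ∀ (f n : Nat) (ds : List Char), n ≤ f →
    Nat.toDigitsCore 2 (f + 1) n ds = charBits n ++ ds := by
  intro f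
  induction f with
  | zero =>
    intro n ds hn
    interval_cases n
    simp [Nat.toDigitsCore, charBits]
  | succ f ih =>
    intro n ds hn
    rw [Nat.toDigitsCore]
    by_cases h : n / 2 = 0
    · rw [if_pos h, charBits, dif_pos h]; rfl
    · rw [if_neg h]
      conv_rhs => rw [charBits]
      rw [dif_neg h, ih (n / 2) _ (by omega)]
      simp

lemma toDigits_eq_charBits (n : Nat) : Nat.toDigits 2 n = charBits n :=
  by simpa using toDigitsCore_eq_charBits n n [] le_rfl

lemma digitChar_val (r : Nat) (hr : r < 2) :
    (PySem.Int.ofChars? [Nat.digitChar r]).getD 0 = (r : Int) := by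
  interval_cases r <;> decide

lemma map_charBits (m : Nat) :
    (charBits m).map (fun b => (PySem.Int.ofChars? [b]).getD 0) = natBits m := by
  induction m using Nat.strong_induction_on with
  | _ m ih =>
    rw [charBits, natBits]
    by_cases h : m / 2 = 0
    · rw [dif_pos h, if_pos (by omega)]
      have hm : m % 2 = m := Nat.mod_eq_of_lt (by omega)
      simp only [List.map_cons, List.map_nil, hm]
      rw [digitChar_val m (by omega)]
    · rw [dif_neg h, if_neg (by omega)]
      simp [ih (m / 2) (Nat.div_lt_self (by omega) (by omega)),
        digitChar_val (m % 2) (Nat.mod_lt _ (by norm_num))]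

-- the bit B extracts at position i, for a nonnegative value
lemma band_shift_nat (m i : Nat) :
    PySem.Int.band ((m : Int) >>> i) 1 = ((m >>> i : Nat) % 2 : Nat) := by
  have h : ((m : Int) >>> i) = ((m >>> i : Nat) : Int) := rfl
  rw [h]
  have h1 : (1 : Int) = ((1 : Nat) : Int) := rfl
  rw [h1, PySem.Int.band_natCast, Nat.and_one_is_mod]

def gbit (m i : Nat) : Int := ((m / 2 ^ i) % 2 : Nat)

lemma natBits_eq_rev_range (m : Nat) :
    natBits m = (((List.range (natBits m).length).map (gbit m))).reverse := by
  induction m using Nat.strong_induction_on with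
  | _ m ih =>
    rw [natBits]
    by_cases h : m < 2
    · rw [if_pos h]
      simp [gbit, Nat.mod_eq_of_lt h]
    · rw [if_neg h]
      have ihh := ih (m / 2) (Nat.div_lt_self (by omega) (by omega))
      have hg : ∀ i : Nat, gbit m (i + 1) = gbit (m / 2) i := by
        intro i
        simp [gbit, Nat.pow_succ, Nat.div_div_eq_div_mul, Nat.mul_comm]
      have hlen : (natBits (m / 2) ++ [((m % 2 : Nat) : Int)]).length
          = (natBits (m / 2)).length + 1 := by simp
      rw [hlen, List.range_succ_eq_map]
      simp only [List.map_cons, List.map_map]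
      have : (List.range (natBits (m / 2)).length).map (gbit m ∘ Nat.succ)
          = (List.range (natBits (m / 2)).length).map (gbit (m / 2)) := by
        apply List.map_congr_left; intro i _; exact hg i
      rw [this, List.reverse_cons, ← ihh]
      congr 1
      simp [gbit]

lemma natBits_length_pos (m : Nat) : 0 < (natBits m).length := by
  rw [natBits]; split <;> simp

lemma natBits_lt (m : Nat) : m < 2 ^ (natBits m).length := by
  induction m using Nat.strong_induction_on with
  | _ m ih =>
    rw [natBits]
    by_cases h : m < 2
    · rw [if_pos h]; simpa using h
    · rw [if_neg h]
      have := ih (m / 2) (Nat.div_lt_self (by omega) (by omega))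
      simp only [List.length_append, List.length_cons, List.length_nil]
      rw [Nat.pow_succ]
      omega

lemma natBits_length_eq (m : Nat) (hm : 0 < m) :
    (natBits m).length = PySem.Int.bitLength (m : Int) := by
  induction m using Nat.strong_induction_on with
  | _ m ih =>
    rw [natBits, PySem.Int.bitLength_natCast hm]
    by_cases h : m < 2
    · have : m = 1 := by omega
      subst this
      simp [PySem.Int.bitLength_zero]
    · rw [if_neg h]
      simp [ih (m / 2) (Nat.div_lt_self (by omega) (by omega)) (by omega)]

lemma natBits_length_le (m : Nat) :
    (natBits m).length ≤ max 32 (PySem.Int.bitLength (m : Int)) := by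
  by_cases h0 : m = 0
  · subst h0; rw [natBits]; simp
  · rw [natBits_length_eq m (by omega)]; omega

lemma gbit_zero_of_ge (m W : Nat) (hW : m < 2 ^ W) (i : Nat) (hi : W ≤ i) : gbit m i = 0 := by
  have : m / 2 ^ i = 0 := Nat.div_eq_of_lt (lt_of_lt_of_le hW (Nat.pow_le_pow_right (by norm_num) hi))
  simp [gbit, this]

lemma cerosBE_eq_replicate (bits : List Int) (long : Nat) :
    cerosBE bits long = List.replicate (long - bits.length) 0 ++ bits := by
  by_cases h : bits.length < long
  · rw [cerosBE, if_pos h]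
    rw [cerosBE_eq_replicate (0 :: bits) long]
    have : long - bits.length = (long - (0 :: bits).length) + 1 := by
      simp only [List.length_cons]; omega
    rw [this, List.replicate_succ']
    simp
  · rw [cerosBE, if_neg h]
    have : long - bits.length = 0 := by omega
    simp [this]
termination_by long - bits.length

lemma pad_rev_range (m : Nat) (W : Nat) (hL : (natBits m).length ≤ W) :
    List.replicate (W - (natBits m).length) 0 ++ natBits m
      = ((List.range W).map (gbit m)).reverse := by
  induction W with
  | zero => exact absurd hL (by have := natBits_length_pos m; omega)
  | succ W ihW =>
    by_cases h : (natBits m).length ≤ W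
    · have hm : m < 2 ^ W := by
        calc m < 2 ^ (natBits m).length := natBits_lt m
        _ ≤ 2 ^ W := Nat.pow_le_pow_right (by norm_num) h
      rw [List.range_succ, List.map_append, List.reverse_append]
      simp only [List.map_cons, List.map_nil, List.reverse_cons, List.reverse_nil, List.nil_append]
      rw [← ihW h, gbit_zero_of_ge m W hm W le_rfl]
      have : W + 1 - (natBits m).length = (W - (natBits m).length) + 1 := by omega
      rw [this, List.replicate_succ]
      simp
    · have hEq : (natBits m).length = W + 1 := by omega
      rw [hEq, Nat.sub_self, List.replicate_zero, List.nil_append,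
        natBits_eq_rev_range m, hEq]

-- fold-with-append over a list is map (the shape of both of A's accumulation loops)
lemma foldl_nil_append_eq_map {α β : Type} (f : α → β) (xs : List α) :
    xs.foldl (fun p b => p ++ [f b]) [] = xs.map f := by
  simpa using PySem.List.foldl_append_singleton_eq_map f xs []

-- A's per-element computation equals B's, for a nonnegative parsed value
lemma elem_eq (m : Nat) :
    cerosBE ((PySem.List.slice (PySem.Int.toBinChars0b (m : Int)) (some 2) none).foldl
        (fun p b => p ++ [(PySem.Int.ofChars? [b]).getD 0]) []) 32
      = ((List.range (max 32 (PySem.Int.bitLength (m : Int)))).map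
          (fun i : Nat => PySem.Int.band ((m : Int) >>> i) 1)).reverse := by
  have h0b : PySem.Int.toBinChars0b (m : Int) = '0' :: 'b' :: Nat.toDigits 2 m := by
    simp [PySem.Int.toBinChars0b]
  have hslice : PySem.List.slice (PySem.Int.toBinChars0b (m : Int)) (some 2) none
      = Nat.toDigits 2 m := by
    rw [h0b]
    have := PySem.List.slice_from_natCast ('0' :: 'b' :: Nat.toDigits 2 m) 2
    simpa using this
  rw [hslice, foldl_nil_append_eq_map (f := fun b => (PySem.Int.ofChars? [b]).getD 0)]
  rw [toDigits_eq_charBits, map_charBits]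
  have hB : ∀ i : Nat, PySem.Int.band ((m : Int) >>> i) 1 = gbit m i := by
    intro i
    rw [band_shift_nat, Nat.shiftRight_eq_div_pow]; rfl
  rw [List.map_congr_left (fun i _ => hB i)]
  rw [cerosBE_eq_replicate]
  have hsub : 32 - (natBits m).length
      = max 32 (PySem.Int.bitLength (m : Int)) - (natBits m).length := by
    by_cases h0 : m = 0
    · subst h0; simp [natBits, PySem.Int.bitLength_zero]
    · rw [← natBits_length_eq m (by omega)]; omega
  rw [hsub]
  exact pad_rev_range m _ (natBits_length_le m)

-- ===== VERDICT (by name: the statement is the Claim_ definition above) =====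
theorem inicializar_spec : Claim_equal_inicializar := by
  intro val _ hpre
  unfold Spec_inicializar inicializar inicializar_alt
  have hfold := foldl_nil_append_eq_map
    (fun binario : List Char =>
      cerosBE (binario.foldl (fun p b => p ++ [(PySem.Int.ofChars? [b]).getD 0]) []) 32)
    (val.map (fun v =>
      PySem.List.slice (PySem.Int.toBinChars0b ((PySem.Int.ofStrBase? v 16).getD 0)) (some 2) none))
  rw [hfold, List.map_map]
  apply List.map_congr_left
  intro v hv
  have hpv := hpre v hv
  simp only [Function.comp]
  rcases ho : PySem.Int.ofStrBase? v 16 with _ | n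
  · rw [ho] at hpv; simp at hpv
  · rw [ho] at hpv
    simp only [Option.getD_some] at hpv ⊢
    obtain ⟨m, rfl⟩ : ∃ m : Nat, n = (m : Int) := ⟨n.toNat, (Int.toNat_of_nonneg hpv).symm⟩
    exact elem_eq m
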